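-- pv_equiv track=rewrite | github.com/fermingp/Practica1-merge-concurrente | practica1_prod_cons.py | min_buffer
-- ===== SOURCE A (Python) =====
-- def min_buffer(buffer):  #Función que devuelve el mínimo del buffer y el productor al que corresponde
--     n=len(buffer)
--     result = []
--     for i in range(n):
--         if buffer[i]!=-1:
--             result.append((buffer[i],i)) #metemos tupla (elem,pos)
--     min_buf=min(result) #el minimo es el de primera componente (elemento) menor
--     pos_min=result[result.index(min_buf)][1]
--     return min_buf[0], pos_min
-- ===== SOURCE B (Python) =====
-- def min_buffer(buffer):
--     # Sort the (value, index) pairs of the valid entries and take the first one: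
--     # Python's lexicographic tuple sort puts the minimum value, lowest index first.
--     pairs = sorted((v, i) for i, v in enumerate(buffer) if v != -1)
--     return pairs[0][0], pairs[0][1]
-- ===== Notes on version B (the rewrite author's own statement) =====
-- stated objective: simpler
-- what changed: B replaces A's min-over-a-built-list plus list.index re-scan by sorting the (value,index) pairs of the valid entries and taking the first pair; lexicographic tuple sort yields the same minimum and lowest-index tie-break in two lines.
import Mathlib
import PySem

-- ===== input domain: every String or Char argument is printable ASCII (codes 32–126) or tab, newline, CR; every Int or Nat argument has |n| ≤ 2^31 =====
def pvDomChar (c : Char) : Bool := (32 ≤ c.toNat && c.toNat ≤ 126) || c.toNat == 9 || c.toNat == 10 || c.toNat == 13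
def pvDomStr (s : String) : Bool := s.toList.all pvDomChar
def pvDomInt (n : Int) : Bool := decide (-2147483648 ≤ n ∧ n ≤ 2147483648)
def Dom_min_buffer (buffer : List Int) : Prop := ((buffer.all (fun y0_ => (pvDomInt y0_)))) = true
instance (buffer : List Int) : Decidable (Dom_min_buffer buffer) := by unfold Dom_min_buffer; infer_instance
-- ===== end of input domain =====

-- B replaces A's min-over-a-built-list plus list.index re-scan by sorting the
-- (value, index) pairs and taking the first; objective: simpler.

-- ===== PORT A =====
-- A: result = [(buffer[i], i) for i in range(n) if buffer[i] != -1]; min_buf = min(result);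
--    pos_min = result[result.index(min_buf)][1]; return min_buf[0], pos_min.
-- Python's min of an empty list raises ValueError: those inputs are excluded by Pre_
-- below; the (0, 0) arms are never reached under Pre_.
def min_buffer (buffer : List Int) : Int × Int :=
  let n : Int := PySem.List.len buffer
  let result : List (Int × Int) :=
    (PySem.List.pyRange 0 n).foldl
      (fun acc i =>
        if PySem.List.pyGetD buffer i 0 != -1 then acc ++ [(PySem.List.pyGetD buffer i 0, i)]
        else acc) []
  match PySem.List.min2? result (·.1) (·.2) with
  | none => (0, 0)
  | some min_buf =>
    match PySem.List.index? result min_buf with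
    | none => (0, 0)
    | some k =>
      match PySem.List.pyGet? result (k : Int) with
      | none => (0, 0)
      | some p => (min_buf.1, p.2)

-- ===== PORT B =====
-- B: pairs = sorted((v, i) for i, v in enumerate(buffer) if v != -1); return pairs[0].
-- Python's tuple sort is sorted2 with both component keys. On an empty pairs list
-- Python raises IndexError: excluded by Pre_, the (0, 0) arm is never reached there.
def min_buffer_alt (buffer : List Int) : Int × Int :=
  let pairs : List (Int × Int) :=
    PySem.List.sorted2
      (((PySem.List.enumerate buffer 0).filter (fun p => p.2 != -1)).map (fun p => (p.2, p.1)))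
      (·.1) (·.2)
  match pairs with
  | [] => (0, 0)
  | p :: _ => (p.1, p.2)

-- ===== PRECONDITION & SPEC =====
-- Pre_ excludes exactly the inputs on which A raises ValueError (min of an empty list):
-- buffers with no element different from -1; B raises IndexError there too.
def Pre_min_buffer (buffer : List Int) : Prop := (buffer.any (fun x => x != -1)) = true
instance (buffer : List Int) : Decidable (Pre_min_buffer buffer) := by unfold Pre_min_buffer; infer_instance
def pvWitness_min_buffer : List Int := [3, -1, 2, 2]
def Spec_min_buffer (buffer : List Int) (out : Int × Int) : Prop := out = min_buffer_alt buffer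
instance (buffer : List Int) (out : Int × Int) : Decidable (Spec_min_buffer buffer out) := by unfold Spec_min_buffer; infer_instance

-- ===== CLAIM (what is proved, stated in full; the proofs are below) =====
def Claim_equal_min_buffer : Prop := ∀ (buffer : List Int), Dom_min_buffer buffer → Pre_min_buffer buffer → Spec_min_buffer buffer (min_buffer buffer)

-- ===== LEMMAS AND PROOFS =====

-- head of an insertion: the smaller (w.r.t. the comparator) of x and the old head
theorem pv_head?_insertBy {α : Type} (lt : α → α → Bool) (x : α) (ys : List α) :
    (PySem.List.insertBy lt x ys).head? =
      (match ys.head? with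
       | none => some x
       | some y => if lt x y then some x else some y) := by
  cases ys with
  | nil => rfl
  | cons y t =>
    simp only [PySem.List.insertBy, List.head?_cons]
    split_ifs <;> rfl

-- the head of a fold of insertions is the running minimum w.r.t. the comparator
theorem pv_head?_foldl_insertBy {α : Type} (lt : α → α → Bool) (xs : List α) (acc : List α) :
    (xs.foldl (fun a x => PySem.List.insertBy lt x a) acc).head? =
      xs.foldl
        (fun (o : Option α) x =>
          match o with
          | none => some x
          | some m => if lt x m then some x else some m) acc.head? := by
  induction xs generalizing acc with
  | nil => rfl
  | cons x t ih =>
    simp only [List.foldl_cons]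
    rw [ih, pv_head?_insertBy]


-- min of the (value, index) tuples IS the head of their sort
theorem pv_min2?_eq_head_sorted2 (l : List (Int × Int)) :
    PySem.List.min2? l (·.1) (·.2) = (PySem.List.sorted2 l (·.1) (·.2) false).head? := by
  unfold PySem.List.min2? PySem.List.sorted2
  rw [pv_head?_foldl_insertBy]
  rfl

-- A's result list is the swap-map of the filtered enumeration of the buffer.
theorem pv_result_eq (buffer : List Int) :
    (PySem.List.pyRange 0 (PySem.List.len buffer)).foldl
      (fun acc i =>
        if PySem.List.pyGetD buffer i 0 != -1 then acc ++ [(PySem.List.pyGetD buffer i 0, i)]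
        else acc) []
    = ((PySem.List.enumerate buffer 0).filter (fun p => p.2 != -1)).map (fun p => (p.2, p.1)) := by
  rw [PySem.List.foldl_append_if (fun i => PySem.List.pyGetD buffer i 0 != -1)
        (fun i => (PySem.List.pyGetD buffer i 0, i))]
  rw [PySem.List.enumerate_eq_map_pyRange buffer 0]
  simp [List.filter_map, List.map_map, Function.comp_def]

theorem pv_filter_ne_nil (buffer : List Int) (h : Pre_min_buffer buffer) :
    (PySem.List.enumerate buffer 0).filter (fun p => p.2 != -1) ≠ [] := by
  unfold Pre_min_buffer at h
  rw [List.any_eq_true] at h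
  rcases h with ⟨x, hx, hxne⟩
  rcases List.getElem_of_mem hx with ⟨k, hk, rfl⟩
  intro hnil
  have hmem : ((0 : Int) + k, buffer[k]) ∈ PySem.List.enumerate buffer 0 :=
    (PySem.List.mem_enumerate_iff buffer 0 _).mpr ⟨k, hk, rfl⟩
  have := List.filter_eq_nil_iff.mp hnil _ hmem
  simp_all

-- ===== VERDICT (by name: the statement is the Claim_ definition above) =====
theorem min_buffer_spec : Claim_equal_min_buffer := by
  intro buffer _ hpre
  unfold Spec_min_buffer min_buffer min_buffer_alt
  simp only [pv_result_eq buffer]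
  have hlne : (((PySem.List.enumerate buffer 0).filter (fun p => p.2 != -1)).map
      (fun p => (p.2, p.1))) ≠ [] := by
    intro h
    exact pv_filter_ne_nil buffer hpre (List.map_eq_nil_iff.mp h)
  revert hlne
  generalize ((PySem.List.enumerate buffer 0).filter (fun p => p.2 != -1)).map
      (fun p : Int × Int => (p.2, p.1)) = l
  intro hlne
  have hperm := PySem.List.sorted2_perm l (fun p : Int × Int => p.1) (fun p => p.2) false
  cases hs : PySem.List.sorted2 l (·.1) (·.2) false with
  | nil =>
    rw [hs] at hperm
    exact absurd hperm.symm.eq_nil hlne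
  | cons p t =>
    have hmin : PySem.List.min2? l (·.1) (·.2) = some p := by
      rw [pv_min2?_eq_head_sorted2, hs]; rfl
    rw [hmin]
    have hpl : p ∈ l := by
      rw [hs] at hperm
      exact hperm.mem_iff.mp (by simp)
    have hsome : (PySem.List.index? l p).isSome :=
      (PySem.List.index?_isSome_iff l p).mpr hpl
    cases hidx : PySem.List.index? l p with
    | none => rw [hidx] at hsome; simp at hsome
    | some k =>
      rcases PySem.List.getElem_of_index?_eq_some hidx with ⟨hk, hget, -⟩
      have hpg : PySem.List.pyGet? l (k : Int) = some p := by
        rw [PySem.List.pyGet?_natCast, List.getElem?_eq_getElem hk, hget]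
      have h1 : List.idxOf? p l = some k := hidx
      have h2 : l[k]? = some p := List.getElem?_eq_getElem hk |>.trans (by rw [hget])
      simp [h1, h2]
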